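-- pv_equiv track=rewrite | github.com/thisishaykins/Codility-Tests | Mini-Deletion.py | solution
-- ===== SOURCE A (Python) =====
-- def solution(S):
--     min_deletions, left_b = 0, 0
--     if not S:
--         return min_deletions
--
--     for k in S:
--         if k == "A":
--             min_deletions = min(left_b, min_deletions + 1)
--         else:
--             left_b += 1
--
--     return min_deletions
-- ===== SOURCE B (Python) =====
-- def solution(S):
--     # Split-point formulation: answer = min over all split points of
--     # (non-A chars before the split) + (letter-A chars at or after the split).
--     a_remaining = 0
--     for ch in S:
--         if ch == "A":
--             a_remaining += 1
--     best = a_remaining  # split before the first character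
--     b_seen = 0
--     for ch in S:
--         if ch == "A":
--             a_remaining -= 1
--         else:
--             b_seen += 1
--         cand = b_seen + a_remaining
--         if cand < best:
--             best = cand
--     return best
-- ===== Notes on version B (the rewrite author's own statement) =====
-- stated objective: alternative
-- what changed: Replaces the running min-deletion DP (which updates min(left_b, min+1) at each letter-A character) with a split-point formulation: count the letter-A characters once, then a single scan minimising non-A-before-split plus A-after-split over all split points.
import Mathlib
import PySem

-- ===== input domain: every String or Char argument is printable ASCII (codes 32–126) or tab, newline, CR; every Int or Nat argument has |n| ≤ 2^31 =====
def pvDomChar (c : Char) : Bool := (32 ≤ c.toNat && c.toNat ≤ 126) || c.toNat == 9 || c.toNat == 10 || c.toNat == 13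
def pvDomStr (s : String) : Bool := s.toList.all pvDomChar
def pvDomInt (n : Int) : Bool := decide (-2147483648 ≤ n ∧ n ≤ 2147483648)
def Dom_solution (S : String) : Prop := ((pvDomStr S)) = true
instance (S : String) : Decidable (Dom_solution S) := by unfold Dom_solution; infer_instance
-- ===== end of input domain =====

-- B replaces A's running min-deletion DP with a count-then-split-point scan; alternative decomposition, same cost.

-- ===== PORT A =====
def solution (S : String) : Int :=
  if S.toList.isEmpty then 0
  else
    (S.toList.foldl
      (fun (st : Int × Int) k =>
        if k == 'A' then (min st.2 (st.1 + 1), st.2) else (st.1, st.2 + 1))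
      (0, 0)).1

-- ===== PORT B =====
def solution_alt (S : String) : Int :=
  let aTotal : Int :=
    S.toList.foldl (fun a ch => if ch == 'A' then a + 1 else a) 0
  (S.toList.foldl
    (fun (st : Int × Int × Int) ch =>
      let a := if ch == 'A' then st.1 - 1 else st.1
      let bs := if ch == 'A' then st.2.1 else st.2.1 + 1
      let cand := bs + a
      (a, bs, if cand < st.2.2 then cand else st.2.2))
    (aTotal, 0, aTotal)).2.2

-- ===== PRECONDITION & SPEC =====
def Spec_solution (S : String) (out : Int) : Prop := out = solution_alt S
instance (S : String) (out : Int) : Decidable (Spec_solution S out) := by unfold Spec_solution; infer_instance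

-- ===== CLAIM (what is proved, stated in full; the proofs are below) =====
def Claim_equal_solution : Prop := ∀ (S : String), Dom_solution S → Spec_solution S (solution S)

-- ===== LEMMAS AND PROOFS =====

-- A's loop step (definitionally the lambda in `solution`)
def pvStepA (st : Int × Int) (k : Char) : Int × Int :=
  if k == 'A' then (min st.2 (st.1 + 1), st.2) else (st.1, st.2 + 1)

-- B's loop step (definitionally the lambda in `solution_alt`)
def pvStepB (st : Int × Int × Int) (ch : Char) : Int × Int × Int :=
  let a := if ch == 'A' then st.1 - 1 else st.1
  let bs := if ch == 'A' then st.2.1 else st.2.1 + 1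
  let cand := bs + a
  (a, bs, if cand < st.2.2 then cand else st.2.2)

-- Invariant: starting B's scan with a_remaining = count of 'A' in l and best = m + that count,
-- the final best equals A's DP value, provided the DP invariant m ≤ b holds.
theorem pvKey (l : List Char) : ∀ (m b : Int), m ≤ b →
    (l.foldl pvStepB (((l.count 'A' : Int)), b, m + (l.count 'A' : Int))).2.2
      = (l.foldl pvStepA (m, b)).1 := by
  induction l with
  | nil => intro m b _; simp
  | cons c t ih =>
    intro m b hmb
    by_cases hc : c = 'A'
    · have hstB : pvStepB (((c :: t).count 'A' : Int), b, m + ((c :: t).count 'A' : Int)) c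
          = ((t.count 'A' : Int), b, min b (m + 1) + (t.count 'A' : Int)) := by
        simp [pvStepB, hc]
        split <;> omega
      have hstA : pvStepA (m, b) c = (min b (m + 1), b) := by
        simp [pvStepA, hc]
      simp only [List.foldl_cons, hstA, hstB]
      exact ih (min b (m + 1)) b (by omega)
    · have hstB : pvStepB (((c :: t).count 'A' : Int), b, m + ((c :: t).count 'A' : Int)) c
          = ((t.count 'A' : Int), b + 1, m + (t.count 'A' : Int)) := by
        simp [pvStepB, hc]
        omega
      have hstA : pvStepA (m, b) c = (m, b + 1) := by
        simp [pvStepA, hc]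
      simp only [List.foldl_cons, hstA, hstB]
      exact ih m (b + 1) (by omega)

theorem pvAlt_eq (S : String) :
    solution_alt S = (S.toList.foldl pvStepB
      (((S.toList.count 'A' : Int)), 0, (S.toList.count 'A' : Int))).2.2 := by
  have hc : (S.toList.foldl (fun a ch => if ch == 'A' then a + 1 else a) 0 : Int)
      = (S.toList.count 'A' : Int) := by
    simpa using PySem.List.foldl_beq_add_one (l := S.toList) (v := 'A') (a := (0 : Int))
  simp only [solution_alt, hc]
  rfl

-- ===== VERDICT (by name: the statement is the Claim_ definition above) =====
theorem solution_spec : Claim_equal_solution := by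
  intro S _
  unfold Spec_solution
  rw [pvAlt_eq]
  have h := pvKey S.toList 0 0 (le_refl 0)
  rw [zero_add] at h
  unfold solution
  rcases hS : S.toList with _ | ⟨c, t⟩
  · simp
  · rw [hS] at h
    rw [if_neg (by simp)]
    exact h.symm
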